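-- pv_equiv track=rewrite | github.com/papibe/flipflop-2025 | python/day02/part2.py | solve
-- ===== SOURCE A (Python) =====
-- from typing import Dict, Optional
--
-- UP: str = "^"
--
-- DOWN: str = "v"
--
-- def solve(data: str) -> int:
--     height: int = 0
--     max_height: int = 0
--     repetitions: int = 0
--     previous: Optional[str] = None
--
--     for char in data:
--         if char == previous:
--             repetitions += 1
--         else:
--             repetitions = 1
--
--         if char == UP:
--             height += repetitions
--         elif char == DOWN:
--             height -= repetitions
--
--         max_height = max(max_height, height)
--         previous = char
--
--     return max_height
-- ===== SOURCE B (Python) =====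
-- def solve(data: str) -> int:
--     height = 0
--     max_height = 0
--     n = len(data)
--     i = 0
--     while i < n:
--         ch = data[i]
--         j = i
--         while j < n and data[j] == ch:
--             j += 1
--         k = j - i
--         total = k * (k + 1) // 2
--         if ch == "^":
--             height += total
--             if height > max_height:
--                 max_height = height
--         elif ch == "v":
--             height -= total
--         i = j
--     return max_height
-- ===== Notes on version B (the rewrite author's own statement) =====
-- stated objective: alternative
-- what changed: B scans maximal runs of identical characters and applies the triangular closed form k*(k+1)//2 per run, updating the maximum only at the end of up-runs, instead of A's per-character counter/previous-char state machine with a max update on every character.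
import Mathlib
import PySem

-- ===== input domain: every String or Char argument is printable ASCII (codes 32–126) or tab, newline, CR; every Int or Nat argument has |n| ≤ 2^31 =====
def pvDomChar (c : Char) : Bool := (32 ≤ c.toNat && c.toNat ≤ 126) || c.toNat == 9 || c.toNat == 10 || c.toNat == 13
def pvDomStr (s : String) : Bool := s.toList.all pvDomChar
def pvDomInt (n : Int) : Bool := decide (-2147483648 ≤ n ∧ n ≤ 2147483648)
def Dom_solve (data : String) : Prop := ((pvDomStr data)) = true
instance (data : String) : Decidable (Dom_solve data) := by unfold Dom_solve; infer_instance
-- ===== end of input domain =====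

-- B replaces A's per-character counter/previous-char state machine by a run-length scan using the
-- triangular closed form per run, updating the maximum only at the end of '^' runs (objective: alternative).

-- ===== PORT A =====
def solveStep (s : Int × Int × Int × Option Char) (char : Char) : Int × Int × Int × Option Char :=
  let reps : Int := if some char = s.2.2.2 then s.2.2.1 + 1 else 1
  let height : Int := if char = '^' then s.1 + reps else if char = 'v' then s.1 - reps else s.1
  (height, max s.2.1 height, reps, some char)

def solve (data : String) : Int :=
  (data.toList.foldl solveStep (0, 0, 0, none)).2.1

-- ===== PORT B =====
-- B's inner while loop scanning the current run is the takeWhile/dropWhile split; k*(k+1)//2 is PySem.Int.floordiv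
def altLoop : List Char → Int → Int → Int
  | [], _, mh => mh
  | c :: rest, h, mh =>
    let k : Int := (rest.takeWhile (· == c)).length + 1
    let total := PySem.Int.floordiv (k * (k + 1)) 2
    if c = '^' then
      altLoop (rest.dropWhile (· == c)) (h + total) (if h + total > mh then h + total else mh)
    else if c = 'v' then
      altLoop (rest.dropWhile (· == c)) (h - total) mh
    else
      altLoop (rest.dropWhile (· == c)) h mh
termination_by l => l.length
decreasing_by all_goals exact Nat.lt_succ_of_le (List.length_dropWhile_le _ _)

def solve_alt (data : String) : Int := altLoop data.toList 0 0

-- ===== PRECONDITION & SPEC =====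
def Spec_solve (data : String) (out : Int) : Prop := out = solve_alt data
instance (data : String) (out : Int) : Decidable (Spec_solve data out) := by unfold Spec_solve; infer_instance

-- ===== CLAIM (what is proved, stated in full; the proofs are below) =====
def Claim_equal_solve : Prop := ∀ (data : String), Dom_solve data → Spec_solve data (solve data)

-- ===== LEMMAS AND PROOFS =====

-- triangular number, recursion-friendly form
def tri : Nat → Int
  | 0 => 0
  | k + 1 => tri k + (k + 1)

theorem tri_nonneg (k : Nat) : 0 ≤ tri k := by
  induction k with
  | zero => simp [tri]
  | succ k ih => simp only [tri]; omega

theorem floordiv_tri (k : Nat) :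
    PySem.Int.floordiv (((k : Int)) * ((k : Int) + 1)) 2 = tri k := by
  induction k with
  | zero =>
    rw [PySem.Int.floordiv_eq_ediv_of_pos (by omega)]
    simp [tri]
  | succ k ih =>
    rw [PySem.Int.floordiv_eq_ediv_of_pos (by omega)] at ih ⊢
    have hrel : (((k + 1 : Nat)) : Int) * ((((k + 1 : Nat)) : Int) + 1) =
        (k : Int) * ((k : Int) + 1) + 2 * ((k : Int) + 1) := by push_cast; ring
    rw [hrel]
    simp only [tri]
    omega

theorem ite_gt_eq_max (a b : Int) : (if a > b then a else b) = max b a := by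
  rw [max_def]; split_ifs <;> omega

-- one run-step of B, with the floor division evaluated to tri
theorem altLoop_cons (c : Char) (rest : List Char) (h mh : Int) :
    altLoop (c :: rest) h mh =
      if c = '^' then
        altLoop (rest.dropWhile (· == c))
          (h + tri ((rest.takeWhile (· == c)).length + 1))
          (max mh (h + tri ((rest.takeWhile (· == c)).length + 1)))
      else if c = 'v' then
        altLoop (rest.dropWhile (· == c))
          (h - tri ((rest.takeWhile (· == c)).length + 1)) mh
      else
        altLoop (rest.dropWhile (· == c)) h mh := by
  rw [altLoop]
  have htot := floordiv_tri ((rest.takeWhile (· == c)).length + 1)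
  push_cast at htot
  simp only [htot, ite_gt_eq_max]

-- A's fold over the continuation of a run (prev = c, reps already counting)
theorem foldl_run (c : Char) (k : Nat) : ∀ (h mh j : Int), 1 ≤ j → h ≤ mh →
    (List.replicate k c).foldl solveStep (h, mh, j, some c) =
      if c = '^' then (h + ((k : Int) * j + tri k), max mh (h + ((k : Int) * j + tri k)), j + k, some c)
      else if c = 'v' then (h - ((k : Int) * j + tri k), mh, j + k, some c)
      else (h, mh, j + k, some c) := by
  induction k with
  | zero =>
    intro h mh j hj hle
    simp only [List.replicate_zero, List.foldl_nil, tri, Nat.cast_zero, zero_mul,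
      add_zero]
    split_ifs <;> simp [max_eq_left hle]
  | succ k ih =>
    intro h mh j hj hle
    have htri := tri_nonneg k
    rw [List.replicate_succ, List.foldl_cons]
    by_cases hc1 : c = '^'
    · subst hc1
      have hstep : solveStep (h, mh, j, some '^') '^' = (h + (j + 1), max mh (h + (j + 1)), j + 1, some '^') := by
        simp [solveStep]
      rw [hstep, ih (h + (j + 1)) (max mh (h + (j + 1))) (j + 1) (by omega) (le_max_right _ _),
        if_pos rfl, if_pos rfl]
      have hmul : (k : Int) * (j + 1) = (k : Int) * j + k := by ring
      refine Prod.ext ?_ (Prod.ext ?_ (Prod.ext ?_ rfl))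
      · simp only [tri]; push_cast; ring
      · simp only [tri]
        push_cast
        have hmul2 : ((k : Int) + 1) * j = (k : Int) * j + j := by ring
        rw [hmul, hmul2]
        have h1 : 0 ≤ (k : Int) * j := mul_nonneg (Int.natCast_nonneg k) (by omega)
        generalize (k : Int) * j = t at h1 ⊢
        simp only [max_def]; split_ifs <;> omega
      · push_cast; ring
    · by_cases hc2 : c = 'v'
      · subst hc2
        have hstep : solveStep (h, mh, j, some 'v') 'v' = (h - (j + 1), max mh (h - (j + 1)), j + 1, some 'v') := by
          simp [solveStep]
        have hm : max mh (h - (j + 1)) = mh := max_eq_left (by omega)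
        rw [hstep, hm, ih (h - (j + 1)) mh (j + 1) (by omega) (by omega)]
        simp only [show (('v' : Char) = '^') = False from by simp, if_true, if_false]
        refine Prod.ext ?_ (Prod.ext rfl (Prod.ext ?_ rfl))
        · simp only [tri]; push_cast; ring
        · push_cast; ring
      · have hstep : solveStep (h, mh, j, some c) c = (h, max mh h, j + 1, some c) := by
          simp [solveStep, hc1, hc2]
        rw [hstep, max_eq_left hle, ih h mh (j + 1) (by omega) hle]
        simp only [if_neg hc1, if_neg hc2]
        refine Prod.ext rfl (Prod.ext rfl (Prod.ext ?_ rfl))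
        push_cast; ring

theorem takeWhile_eq_replicate (c : Char) (l : List Char) :
    l.takeWhile (· == c) = List.replicate (l.takeWhile (· == c)).length c := by
  apply List.eq_replicate_of_mem
  intro b hb
  have := List.mem_takeWhile_imp hb
  simpa using this

theorem head?_dropWhile_ne (c : Char) (rest : List Char) (c' : Char)
    (h : (rest.dropWhile (· == c)).head? = some c') : c' ≠ c := by
  induction rest with
  | nil => simp at h
  | cons x xs ih =>
    rw [List.dropWhile_cons] at h
    by_cases hx : (x == c) = true
    · rw [if_pos hx] at h; exact ih h
    · rw [if_neg hx] at h
      simp at h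
      subst h
      simpa using hx

theorem main_lemma : ∀ (n : Nat) (l : List Char), l.length ≤ n →
    ∀ (h mh reps : Int) (prev : Option Char), h ≤ mh →
    (∀ c, l.head? = some c → prev ≠ some c) →
    (l.foldl solveStep (h, mh, reps, prev)).2.1 = altLoop l h mh := by
  intro n
  induction n with
  | zero =>
    intro l hl h mh reps prev hle _
    have hnil : l = [] := List.eq_nil_of_length_eq_zero (Nat.le_zero.mp hl)
    subst hnil; simp [altLoop]
  | succ n ih =>
    intro l hl h mh reps prev hle hprev
    match l with
    | [] => simp [altLoop]
    | c :: rest =>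
      have hrep := takeWhile_eq_replicate c rest
      have hne : ¬ (some c = prev) := fun hcp => hprev c rfl hcp.symm
      have hlrest : rest.length ≤ n := by simpa using hl
      have hlen : (rest.dropWhile (· == c)).length ≤ n :=
        le_trans (List.length_dropWhile_le _ _) hlrest
      have hhead : ∀ c', (rest.dropWhile (· == c)).head? = some c' → (some c : Option Char) ≠ some c' := by
        intro c' hc' he
        exact head?_dropWhile_ne c rest c' hc' (by injection he with he; exact he.symm)
      have htri := tri_nonneg (rest.takeWhile (· == c)).length
      have hsplit : c :: rest =
          List.replicate ((rest.takeWhile (· == c)).length + 1) c ++ rest.dropWhile (· == c) := by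
        rw [List.replicate_succ, List.cons_append, ← hrep, List.takeWhile_append_dropWhile]
      conv_lhs => rw [hsplit]
      rw [List.foldl_append, List.replicate_succ, List.foldl_cons, altLoop_cons]
      by_cases hc1 : c = '^'
      · subst hc1
        have hstep : solveStep (h, mh, reps, prev) '^' = (h + 1, max mh (h + 1), 1, some '^') := by
          simp [solveStep, hne]
        rw [hstep, foldl_run '^' _ (h + 1) (max mh (h + 1)) 1 le_rfl (le_max_right _ _),
          if_pos rfl, if_pos rfl]
        rw [ih _ hlen _ _ _ _ (le_max_right _ _) hhead]
        congr 1
        · simp only [tri]; ring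
        · simp only [tri, mul_one]
          rw [max_assoc]
          congr 1
          · simp only [max_def]; split_ifs <;> push_cast at * <;> omega
      · by_cases hc2 : c = 'v'
        · subst hc2
          have hstep : solveStep (h, mh, reps, prev) 'v' = (h - 1, max mh (h - 1), 1, some 'v') := by
            simp [solveStep, hne]
          have hm : max mh (h - 1) = mh := max_eq_left (by omega)
          rw [hstep, hm, foldl_run 'v' _ (h - 1) mh 1 le_rfl (by omega)]
          simp only [show (('v' : Char) = '^') = False from by simp, if_true, if_false]
          rw [ih _ hlen _ _ _ _ (by omega) hhead]
          congr 1
          simp only [tri]; ring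
        · have hstep : solveStep (h, mh, reps, prev) c = (h, max mh h, 1, some c) := by
            simp [solveStep, hne, hc1, hc2]
          rw [hstep, max_eq_left hle, foldl_run c _ h mh 1 le_rfl hle]
          simp only [if_neg hc1, if_neg hc2]
          exact ih _ hlen _ _ _ _ hle hhead

-- ===== VERDICT (by name: the statement is the Claim_ definition above) =====
theorem solve_spec : Claim_equal_solve := by
  intro data _
  unfold Spec_solve solve solve_alt
  exact main_lemma data.toList.length data.toList le_rfl 0 0 0 none le_rfl (fun c _ => by simp)
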